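-- pv_equiv track=rewrite | github.com/Sven1047/EIN | Computergrafik/IV/Wuerfel - einzeln.py | generiereWuerfel
-- ===== SOURCE A (Python) =====
-- def generiereWuerfel(wuerfel_startpunkt_x, wuerfel_startpunkt_y, wuerfel_startpunkt_z, seitenlaenge):
--
--     SEITE = seitenlaenge
--
--     linien = [
--         # Vorderes Quadrat
--         [[0, 0, 0], [SEITE, 0, 0]],
--         [[SEITE, 0, 0], [SEITE, SEITE, 0]],
--         [[SEITE, SEITE, 0], [0, SEITE, 0]],
--         [[0, SEITE, 0], [0, 0, 0]],
--
--         # Hinteres Quadrat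
--         [[0, 0, SEITE], [SEITE, 0, SEITE]],
--         [[SEITE, 0, SEITE], [SEITE, SEITE, SEITE]],
--         [[SEITE, SEITE, SEITE], [0, SEITE, SEITE]],
--         [[0, SEITE, SEITE], [0, 0, SEITE]],
--
--         # Verknüpfung der Quadrate
--         [[0, 0, 0], [0, 0, SEITE]],
--         [[SEITE, 0, 0], [SEITE, 0, SEITE]],
--         [[SEITE, SEITE, 0], [SEITE, SEITE, SEITE]],
--         [[0, SEITE, 0], [0, SEITE, SEITE]],
--     ]
--
--     for i in range(len(linien)):
--         linie = linien[i]
--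
--         anfang = linie[0]
--         ende = linie[1]
--
--         anfang[0] = anfang[0] + wuerfel_startpunkt_x
--         ende[0] = ende[0] + wuerfel_startpunkt_x
--
--         anfang[1] = anfang[1] + wuerfel_startpunkt_y
--         ende[1] = ende[1] + wuerfel_startpunkt_y
--
--         anfang[2] = anfang[2] + wuerfel_startpunkt_z
--         ende[2] = ende[2] + wuerfel_startpunkt_z
--
--     return linien
-- ===== SOURCE B (Python) =====
-- def generiereWuerfel(wuerfel_startpunkt_x, wuerfel_startpunkt_y, wuerfel_startpunkt_z, seitenlaenge):
--     s = seitenlaenge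
--     ecken = [[0, 0], [s, 0], [s, s], [0, s]]
--
--     def punkt(p, z):
--         return [p[0] + wuerfel_startpunkt_x,
--                 p[1] + wuerfel_startpunkt_y,
--                 z + wuerfel_startpunkt_z]
--
--     vorne = [[punkt(ecken[i], 0), punkt(ecken[(i + 1) % 4], 0)] for i in range(4)]
--     hinten = [[punkt(ecken[i], s), punkt(ecken[(i + 1) % 4], s)] for i in range(4)]
--     verbindungen = [[punkt(ecken[i], 0), punkt(ecken[i], s)] for i in range(4)]
--     return vorne + hinten + verbindungen
-- ===== Notes on version B (the rewrite author's own statement) =====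
-- stated objective: simpler
-- what changed: B derives the 12 edges from the four square corners (front ring, back ring, four connectors built by cyclic index loops) and constructs each already-offset endpoint directly, instead of A's hard-coded 12-edge table mutated in place by a second offsetting loop.
import Mathlib
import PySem

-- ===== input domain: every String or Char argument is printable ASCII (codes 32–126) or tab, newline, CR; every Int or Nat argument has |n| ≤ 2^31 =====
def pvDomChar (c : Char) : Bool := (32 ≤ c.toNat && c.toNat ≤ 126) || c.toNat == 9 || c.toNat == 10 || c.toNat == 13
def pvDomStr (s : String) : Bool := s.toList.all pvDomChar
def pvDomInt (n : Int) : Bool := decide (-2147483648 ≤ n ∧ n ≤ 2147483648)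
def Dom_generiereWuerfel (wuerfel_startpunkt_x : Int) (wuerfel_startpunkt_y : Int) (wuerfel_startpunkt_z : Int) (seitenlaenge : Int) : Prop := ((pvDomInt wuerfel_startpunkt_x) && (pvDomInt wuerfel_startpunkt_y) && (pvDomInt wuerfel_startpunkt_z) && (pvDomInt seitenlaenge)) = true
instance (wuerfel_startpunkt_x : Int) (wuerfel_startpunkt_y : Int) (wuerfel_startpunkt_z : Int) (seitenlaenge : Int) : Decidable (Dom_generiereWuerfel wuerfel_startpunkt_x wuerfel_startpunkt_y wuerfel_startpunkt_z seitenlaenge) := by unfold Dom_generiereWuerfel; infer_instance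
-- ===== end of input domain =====

-- B builds the edges from the four square corners (front ring, back ring, connectors)
-- instead of A's hard-coded 12-edge table with an in-place offsetting loop; objective: simpler.

-- ===== PORT A =====
-- A's in-place mutation 'linie[j][k] = linie[j][k] + d' is modelled by List.set / getD;
-- exact here because every sublist in the literal table has length 2 resp. 3 and the
-- indices are the constants 0,1,2 (no negative indexing, no out-of-range in A).
def pvMutA (wx wy wz : Int) (linie : List (List Int)) : List (List Int) :=
  let anfang := linie.getD 0 []
  let ende := linie.getD 1 []
  let anfang := anfang.set 0 (anfang.getD 0 0 + wx)
  let ende := ende.set 0 (ende.getD 0 0 + wx)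
  let anfang := anfang.set 1 (anfang.getD 1 0 + wy)
  let ende := ende.set 1 (ende.getD 1 0 + wy)
  let anfang := anfang.set 2 (anfang.getD 2 0 + wz)
  let ende := ende.set 2 (ende.getD 2 0 + wz)
  [anfang, ende]

def generiereWuerfel (wuerfel_startpunkt_x : Int) (wuerfel_startpunkt_y : Int) (wuerfel_startpunkt_z : Int) (seitenlaenge : Int) : List (List (List Int)) :=
  let SEITE := seitenlaenge
  let linien : List (List (List Int)) := [
    [[0, 0, 0], [SEITE, 0, 0]],
    [[SEITE, 0, 0], [SEITE, SEITE, 0]],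
    [[SEITE, SEITE, 0], [0, SEITE, 0]],
    [[0, SEITE, 0], [0, 0, 0]],
    [[0, 0, SEITE], [SEITE, 0, SEITE]],
    [[SEITE, 0, SEITE], [SEITE, SEITE, SEITE]],
    [[SEITE, SEITE, SEITE], [0, SEITE, SEITE]],
    [[0, SEITE, SEITE], [0, 0, SEITE]],
    [[0, 0, 0], [0, 0, SEITE]],
    [[SEITE, 0, 0], [SEITE, 0, SEITE]],
    [[SEITE, SEITE, 0], [SEITE, SEITE, SEITE]],
    [[0, SEITE, 0], [0, SEITE, SEITE]]
  ]
  (List.range linien.length).foldl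
    (fun ls i => ls.set i (pvMutA wuerfel_startpunkt_x wuerfel_startpunkt_y wuerfel_startpunkt_z (ls.getD i [])))
    linien

-- ===== PORT B =====
def pvPunktB (wx wy wz : Int) (p : List Int) (z : Int) : List Int :=
  [p.getD 0 0 + wx, p.getD 1 0 + wy, z + wz]

def generiereWuerfel_alt (wuerfel_startpunkt_x : Int) (wuerfel_startpunkt_y : Int) (wuerfel_startpunkt_z : Int) (seitenlaenge : Int) : List (List (List Int)) :=
  let s := seitenlaenge
  let ecken : List (List Int) := [[0, 0], [s, 0], [s, s], [0, s]]
  let punkt := pvPunktB wuerfel_startpunkt_x wuerfel_startpunkt_y wuerfel_startpunkt_z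
  let vorne := (List.range 4).map (fun i => [punkt (ecken.getD i []) 0, punkt (ecken.getD ((i + 1) % 4) []) 0])
  let hinten := (List.range 4).map (fun i => [punkt (ecken.getD i []) s, punkt (ecken.getD ((i + 1) % 4) []) s])
  let verbindungen := (List.range 4).map (fun i => [punkt (ecken.getD i []) 0, punkt (ecken.getD i []) s])
  vorne ++ hinten ++ verbindungen

-- ===== PRECONDITION & SPEC =====
def Spec_generiereWuerfel (wuerfel_startpunkt_x : Int) (wuerfel_startpunkt_y : Int) (wuerfel_startpunkt_z : Int) (seitenlaenge : Int) (out : List (List (List Int))) : Prop := out = generiereWuerfel_alt wuerfel_startpunkt_x wuerfel_startpunkt_y wuerfel_startpunkt_z seitenlaenge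
instance (wuerfel_startpunkt_x : Int) (wuerfel_startpunkt_y : Int) (wuerfel_startpunkt_z : Int) (seitenlaenge : Int) (out : List (List (List Int))) : Decidable (Spec_generiereWuerfel wuerfel_startpunkt_x wuerfel_startpunkt_y wuerfel_startpunkt_z seitenlaenge out) := by unfold Spec_generiereWuerfel; infer_instance

-- ===== CLAIM (what is proved, stated in full; the proofs are below) =====
def Claim_equal_generiereWuerfel : Prop := ∀ (wuerfel_startpunkt_x : Int) (wuerfel_startpunkt_y : Int) (wuerfel_startpunkt_z : Int) (seitenlaenge : Int), Dom_generiereWuerfel wuerfel_startpunkt_x wuerfel_startpunkt_y wuerfel_startpunkt_z seitenlaenge → Spec_generiereWuerfel wuerfel_startpunkt_x wuerfel_startpunkt_y wuerfel_startpunkt_z seitenlaenge (generiereWuerfel wuerfel_startpunkt_x wuerfel_startpunkt_y wuerfel_startpunkt_z seitenlaenge)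

-- ===== LEMMAS AND PROOFS =====

-- ===== VERDICT (by name: the statement is the Claim_ definition above) =====
theorem generiereWuerfel_spec : Claim_equal_generiereWuerfel := by
  intro x y z s _
  unfold Spec_generiereWuerfel generiereWuerfel generiereWuerfel_alt pvMutA pvPunktB
  simp [List.range_succ]
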